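-- pv_equiv track=rewrite | github.com/ikeniborn/pac1-tool | agent/agents_md_parser.py | parse_agents_md
-- ===== SOURCE A (Python) =====
-- def parse_agents_md(content: str) -> dict[str, list[str]]:
--     """Parse AGENTS.MD into {section_name: [lines]} for each ## section."""
--     sections: dict[str, list[str]] = {}
--     current: str | None = None
--     for line in content.splitlines():
--         if line.startswith("## "):
--             current = line[3:].strip().lower().replace(" ", "_")
--             sections[current] = []
--         elif current is not None:
--             sections[current].append(line)
--     return sections
-- ===== SOURCE B (Python) =====
-- def _norm(line):
--     return line[3:].strip().lower().replace(" ", "_")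
--
--
-- def parse_agents_md(content: str) -> dict[str, list[str]]:
--     """Parse AGENTS.MD into {section_name: [lines]} for each ## section."""
--     lines = content.splitlines()
--     n = len(lines)
--     # skip preamble lines before the first '## ' header
--     i = 0
--     while i < n and not lines[i].startswith("## "):
--         i += 1
--     sections: dict[str, list[str]] = {}
--     while i < n:
--         j = i + 1
--         while j < n and not lines[j].startswith("## "):
--             j += 1
--         sections[_norm(lines[i])] = lines[i + 1:j]
--         i = j
--     return sections
-- ===== Notes on version B (the rewrite author's own statement) =====
-- stated objective: alternative
-- what changed: A makes one stateful pass appending each line to the dict entry of the current section; B first skips the preamble, then repeatedly finds the span up to the next '## ' header and assigns each section its whole body slice at once, so no current-section state or per-line appends exist.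
import Mathlib
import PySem

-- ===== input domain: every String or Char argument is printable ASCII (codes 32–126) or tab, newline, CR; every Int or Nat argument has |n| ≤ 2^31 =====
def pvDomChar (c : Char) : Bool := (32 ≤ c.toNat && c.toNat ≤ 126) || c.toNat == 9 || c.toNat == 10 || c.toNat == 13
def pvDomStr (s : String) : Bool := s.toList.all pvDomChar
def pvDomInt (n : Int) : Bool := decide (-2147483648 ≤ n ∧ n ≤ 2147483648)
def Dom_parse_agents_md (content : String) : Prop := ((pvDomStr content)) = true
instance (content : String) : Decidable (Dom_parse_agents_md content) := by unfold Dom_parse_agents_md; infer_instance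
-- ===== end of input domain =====

-- B re-decomposes A's single stateful line loop into a two-level scan (skip the preamble, then
-- group each '## ' header with its span of body lines); same return value, objective: alternative.

-- shared normalisation of a header line: line[3:].strip().lower().replace(" ", "_")
def pamdNorm (line : String) : String :=
  String.ofList (PySem.Chars.replace
    (PySem.Chars.lower (PySem.Chars.strip (PySem.List.slice line.toList (some 3) none)))
    [' '] ['_'])

-- ===== PORT A =====
-- A's loop body: one step per line, state = (sections dict, current section or None)
def pamdStepA (st : PySem.Dict String (List String) × Option String) (line : String) :
    PySem.Dict String (List String) × Option String :=
  if PySem.Str.startswith line "## " then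
    let cur := pamdNorm line
    (st.1.insert cur [], some cur)
  else
    match st.2 with
    | some c => (st.1.modify c [] (fun v => v ++ [line]), st.2)   -- sections[current].append(line)
    | none => st

def parse_agents_md (content : String) : List (String × List String) :=
  (((PySem.Str.splitlines content).foldl pamdStepA (PySem.Dict.empty, none)).1).items

-- ===== PORT B =====
def pamdIsHeader (line : String) : Bool := PySem.Str.startswith line "## "

-- B's inner structure: lines starts with a header (or is empty); grab the body span up to the
-- next header, assign it, and continue from that header (the Lean form of B's index while-loops).
def pamdGo : List String → PySem.Dict String (List String) → PySem.Dict String (List String)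
  | [], acc => acc
  | l :: rest, acc =>
      pamdGo (rest.dropWhile (fun s => !pamdIsHeader s))
             (acc.insert (pamdNorm l) (rest.takeWhile (fun s => !pamdIsHeader s)))
termination_by lines => lines.length
decreasing_by
  have := List.length_dropWhile_le (fun s => !pamdIsHeader s) rest
  simp; omega

def parse_agents_md_alt (content : String) : List (String × List String) :=
  (pamdGo ((PySem.Str.splitlines content).dropWhile (fun s => !pamdIsHeader s))
    PySem.Dict.empty).items

-- ===== PRECONDITION & SPEC =====
def Spec_parse_agents_md (content : String) (out : List (String × List String)) : Prop := out = parse_agents_md_alt content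
instance (content : String) (out : List (String × List String)) : Decidable (Spec_parse_agents_md content out) := by unfold Spec_parse_agents_md; infer_instance

-- ===== CLAIM (what is proved, stated in full; the proofs are below) =====
def Claim_equal_parse_agents_md : Prop := ∀ (content : String), Dom_parse_agents_md content → Spec_parse_agents_md content (parse_agents_md content)

-- ===== LEMMAS AND PROOFS =====

-- appending to the just-inserted key: d[k].append via modify is an insert of the longer list
theorem pamd_modify_insert (d : PySem.Dict String (List String)) (k : String)
    (v : List String) (f : List String → List String) :
    (d.insert k v).modify k [] f = d.insert k (f v) := by
  simp [PySem.Dict.modify, PySem.Dict.getD_insert_self, PySem.Dict.insert_insert_self]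

-- A's loop ignores preamble lines while current is None
theorem pamd_preamble (lines : List String) (d : PySem.Dict String (List String)) :
    lines.foldl pamdStepA (d, none) =
      (lines.dropWhile (fun s => !pamdIsHeader s)).foldl pamdStepA (d, none) := by
  induction lines with
  | nil => rfl
  | cons l rest ih =>
    by_cases h : pamdIsHeader l = true
    · simp [h]
    · have h' : PySem.Chars.startswith l.toList ['#', '#', ' '] = false := by
        simpa [pamdIsHeader] using h
      have h'' : (!pamdIsHeader l) = true := by simp [h]
      simp [h'', List.foldl_cons, pamdStepA, h', ih]

-- A's loop over a headerless span appends exactly that span to the current section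
theorem pamd_span (body : List String) (hb : ∀ l ∈ body, pamdIsHeader l = false) :
    ∀ (rest : List String) (d : PySem.Dict String (List String)) (name : String)
      (acc : List String),
    (body ++ rest).foldl pamdStepA (d.insert name acc, some name) =
      rest.foldl pamdStepA (d.insert name (acc ++ body), some name) := by
  induction body with
  | nil => intro rest d name acc; simp
  | cons b bs ih =>
    intro rest d name acc
    have hbhead : PySem.Chars.startswith b.toList ['#', '#', ' '] = false := by
      simpa [pamdIsHeader] using hb b (by simp)
    have hbs : ∀ l ∈ bs, pamdIsHeader l = false := fun l hl => hb l (by simp [hl])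
    have step : pamdStepA (d.insert name acc, some name) b
        = (d.insert name (acc ++ [b]), some name) := by
      simp [pamdStepA, hbhead, pamd_modify_insert]
    calc (b :: bs ++ rest).foldl pamdStepA (d.insert name acc, some name)
        = (bs ++ rest).foldl pamdStepA (d.insert name (acc ++ [b]), some name) := by
          simp [List.foldl_cons, step]
      _ = rest.foldl pamdStepA (d.insert name ((acc ++ [b]) ++ bs), some name) := ih hbs rest d name (acc ++ [b])
      _ = rest.foldl pamdStepA (d.insert name (acc ++ b :: bs), some name) := by simp

-- the main agreement: on a list that begins with a header (or is empty),
-- A's stateful fold computes exactly B's header-grouping recursion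
theorem pamd_main (n : Nat) :
    ∀ (lines : List String), lines.length ≤ n →
      lines.dropWhile (fun s => !pamdIsHeader s) = lines →
      ∀ (d : PySem.Dict String (List String)) (c : Option String),
        (lines.foldl pamdStepA (d, c)).1 = pamdGo lines d := by
  induction n with
  | zero =>
    intro lines hlen _ d c
    have : lines = [] := List.eq_nil_of_length_eq_zero (Nat.le_zero.mp hlen)
    subst this; simp [pamdGo]
  | succ n ih =>
    intro lines hlen hdw d c
    match lines with
    | [] => simp [pamdGo]
    | h :: rest =>
      have hh : pamdIsHeader h = true := by
        by_contra hc
        have hc' : (!pamdIsHeader h) = true := by simp_all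
        rw [List.dropWhile_cons_of_pos (by simpa using hc')] at hdw
        have := List.length_dropWhile_le (fun s => !pamdIsHeader s) rest
        have : (rest.dropWhile (fun s => !pamdIsHeader s)).length = rest.length + 1 := by
          rw [hdw]; rfl
        omega
      have hh' : PySem.Chars.startswith h.toList ['#', '#', ' '] = true := by
        simpa [pamdIsHeader] using hh
      have step : pamdStepA (d, c) h = (d.insert (pamdNorm h) [], some (pamdNorm h)) := by
        simp [pamdStepA, hh']
      have hsplit : rest.takeWhile (fun s => !pamdIsHeader s)
          ++ rest.dropWhile (fun s => !pamdIsHeader s) = rest :=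
        List.takeWhile_append_dropWhile
      have hbody : ∀ l ∈ rest.takeWhile (fun s => !pamdIsHeader s), pamdIsHeader l = false := by
        intro l hl
        have := List.mem_takeWhile_imp hl
        simpa using this
      have hidem := List.dropWhile_idempotent (fun s => !pamdIsHeader s) rest
      have hlen' : (rest.dropWhile (fun s => !pamdIsHeader s)).length ≤ n := by
        have := List.length_dropWhile_le (fun s => !pamdIsHeader s) rest
        simp at hlen; omega
      calc ((h :: rest).foldl pamdStepA (d, c)).1
          = (rest.foldl pamdStepA (d.insert (pamdNorm h) [], some (pamdNorm h))).1 := by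
            simp [List.foldl_cons, step]
        _ = ((rest.takeWhile (fun s => !pamdIsHeader s)
              ++ rest.dropWhile (fun s => !pamdIsHeader s)).foldl pamdStepA
              (d.insert (pamdNorm h) [], some (pamdNorm h))).1 := by rw [hsplit]
        _ = ((rest.dropWhile (fun s => !pamdIsHeader s)).foldl pamdStepA
              (d.insert (pamdNorm h) (rest.takeWhile (fun s => !pamdIsHeader s)),
               some (pamdNorm h))).1 := by
            rw [pamd_span _ hbody _ _ _ []]; simp
        _ = pamdGo (rest.dropWhile (fun s => !pamdIsHeader s))
              (d.insert (pamdNorm h) (rest.takeWhile (fun s => !pamdIsHeader s))) :=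
            ih _ hlen' hidem _ _
        _ = pamdGo (h :: rest) d := by rw [pamdGo]

-- ===== VERDICT (by name: the statement is the Claim_ definition above) =====
theorem parse_agents_md_spec : Claim_equal_parse_agents_md := by
  intro content _
  unfold Spec_parse_agents_md parse_agents_md parse_agents_md_alt
  rw [pamd_preamble]
  congr 1
  exact pamd_main _ _ le_rfl
    (List.dropWhile_idempotent (fun s => !pamdIsHeader s) (PySem.Str.splitlines content)) _ _
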